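-- pv_equiv track=rewrite | github.com/Clai101/Bs_tautau_an | Decay/filter_dec.py | find_final_states
-- ===== SOURCE A (Python) =====
-- from typing import Dict, List
--
-- def find_final_states(particle: str, decay_dict: Dict) ->   List[List[str]]:
--     if particle not in decay_dict:
--         return [[particle]]
--
--     final_states = []
--
--     for decay in decay_dict[particle]:
--         branches = [find_final_states(p, decay_dict) for p in decay["products"]]
--         from itertools import product
--         for combination in product(*branches):
--             flat_state = []
--             for group in combination:
--                 flat_state.extend(group)
--
--             flat_state.sort()
--
--             if flat_state not in final_states:
--                 final_states.append(flat_state)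
--     return final_states
-- ===== SOURCE B (Python) =====
-- from typing import Dict, List
--
-- def find_final_states(particle: str, decay_dict: Dict) -> List[List[str]]:
--     memo = {}
--
--     def go(p: str) -> List[List[str]]:
--         if p in memo:
--             return memo[p]
--         if p not in decay_dict:
--             res = [[p]]
--         else:
--             seen = set()
--             res = []
--             for decay in decay_dict[p]:
--                 combos = [[]]
--                 for q in decay["products"]:
--                     gq = go(q)
--                     combos = [c + g for c in combos for g in gq]
--                 for c in combos:
--                     s = sorted(c)
--                     t = tuple(s)
--                     if t not in seen:
--                         seen.add(t)
--                         res.append(s)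
--         memo[p] = res
--         return res
--
--     return go(particle)
-- ===== Notes on version B (the rewrite author's own statement) =====
-- stated objective: alternative
-- what changed: B memoizes the per-particle result (each particle's final-state list is computed once and reused), builds the cartesian product of child states with an incremental fold instead of itertools.product over pre-built branch lists, and deduplicates with a set of tuples keeping first-occurrence order instead of a 'not in' scan of the output list.
import Mathlib
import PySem

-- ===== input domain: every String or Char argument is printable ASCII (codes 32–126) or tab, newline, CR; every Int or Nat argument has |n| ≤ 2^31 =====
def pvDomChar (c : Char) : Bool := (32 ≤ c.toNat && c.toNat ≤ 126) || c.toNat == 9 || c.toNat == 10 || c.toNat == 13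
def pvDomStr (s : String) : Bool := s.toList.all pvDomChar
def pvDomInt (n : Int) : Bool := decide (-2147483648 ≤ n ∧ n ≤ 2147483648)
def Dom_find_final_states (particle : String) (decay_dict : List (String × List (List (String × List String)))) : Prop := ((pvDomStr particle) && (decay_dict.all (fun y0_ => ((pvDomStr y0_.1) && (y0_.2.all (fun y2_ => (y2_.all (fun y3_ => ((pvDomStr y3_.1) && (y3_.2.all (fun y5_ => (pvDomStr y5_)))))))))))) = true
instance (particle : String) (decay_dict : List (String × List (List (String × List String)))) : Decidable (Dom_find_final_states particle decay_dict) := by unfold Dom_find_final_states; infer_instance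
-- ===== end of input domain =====

-- B memoizes the per-particle result and dedups with a set of sorted states (hash set) instead of
-- re-enumerating every subtree and scanning the output list; equivalence of return values is proved
-- on acyclic decay dictionaries whose reachable decays carry a "products" key (Pre_).

-- ===== PORT A =====
-- itertools.product over the branch lists (first factor slowest, as in Python)
def prodA (branches : List (List (List String))) : List (List (List String)) :=
  match branches with
  | [] => [[]]
  | b :: bs => b.flatMap (fun g => (prodA bs).map (fun rest => g :: rest))

-- "if flat_state not in final_states: final_states.append(flat_state)"
def stepA (fs : List (List String)) (flat : List String) : List (List String) :=
  if flat ∈ fs then fs else fs ++ [flat]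

-- the recursion of A, with a fuel guard that never fires under Pre_ (A raises RecursionError on cycles)
def ffsA (d : PySem.Dict String (List (List (String × List String)))) :
    Nat → String → List (List String)
  | 0, _ => []
  | n + 1, p =>
    match d.get? p with
    | none => [[p]]
    | some decays =>
      decays.foldl (fun fs decay =>
        let branches := ((PySem.Dict.ofList decay).getD "products" []).map (fun q => ffsA d n q)
        (prodA branches).foldl
          (fun fs c => stepA fs (PySem.List.sorted c.flatten (fun x => x) false)) fs) []

def find_final_states (particle : String)
    (decay_dict : List (String × List (List (String × List String)))) : List (List String) :=
  let d := PySem.Dict.ofList decay_dict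
  ffsA d (d.size + 1) particle

-- ===== PORT B =====
-- memoized recursion: memo is threaded through; per node, combinations are built by a fold and
-- deduplicated with a set of sorted states
def goB (d : PySem.Dict String (List (List (String × List String)))) :
    Nat → String → PySem.Dict String (List (List String)) →
    List (List String) × PySem.Dict String (List (List String))
  | 0, _, m => ([], m)  -- fuel guard, never reached under Pre_
  | n + 1, p, m =>
    match m.get? p with
    | some v => (v, m)
    | none =>
      match d.get? p with
      | none => ([[p]], m.insert p [[p]])
      | some decays =>
        let r := decays.foldl
          (fun (acc : List (List String) × PySem.Set (List String) ×
                      PySem.Dict String (List (List String))) decay =>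
            let cm := ((PySem.Dict.ofList decay).getD "products" []).foldl
              (fun (cm : List (List String) ×
                         PySem.Dict String (List (List String))) q =>
                let gm := goB d n q cm.2
                (cm.1.flatMap (fun c => gm.1.map (fun g => c ++ g)), gm.2))
              ([[]], acc.2.2)
            let rs := cm.1.foldl
              (fun (rs : List (List String) × PySem.Set (List String)) c =>
                let s := PySem.List.sorted c (fun x => x) false
                if PySem.Set.contains rs.2 s then rs
                else (rs.1 ++ [s], PySem.Set.add rs.2 s))
              (acc.1, acc.2.1)
            (rs.1, rs.2, cm.2))
          ([], PySem.Set.empty, m)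
        (r.1, r.2.2.insert p r.1)

def find_final_states_alt (particle : String)
    (decay_dict : List (String × List (List (String × List String)))) : List (List String) :=
  let d := PySem.Dict.ofList decay_dict
  (goB d (d.size + 1) particle PySem.Dict.empty).1

-- ===== PRECONDITION & SPEC =====
-- okp d i p: p is "founded within depth i": every particle reachable from p has, at each decay,
-- a "products" entry, and the reachable decay graph is well-founded (no cycle). This is a
-- reachability/well-foundedness check of the decay graph, not a simulation of either program.
def okp (d : PySem.Dict String (List (List (String × List String)))) :
    Nat → String → Bool
  | 0, p => (d.get? p).isNone
  | i + 1, p =>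
    okp d i p ||
      match d.get? p with
      | none => true
      | some decays =>
        decays.all (fun decay =>
          match (PySem.Dict.ofList decay).get? "products" with
          | none => false
          | some ps => ps.all (okp d i))

-- Pre_ holds exactly when Python A returns normally: on a cyclic reachable decay chain A raises
-- RecursionError, and on a reachable decay without a "products" key it raises KeyError.
def Pre_find_final_states (particle : String)
    (decay_dict : List (String × List (List (String × List String)))) : Prop :=
  okp (PySem.Dict.ofList decay_dict) (PySem.Dict.ofList decay_dict).size particle = true

instance (particle : String) (decay_dict : List (String × List (List (String × List String)))) :
    Decidable (Pre_find_final_states particle decay_dict) := by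
  unfold Pre_find_final_states; infer_instance

def pvWitness_find_final_states : String × (List (String × List (List (String × List String)))) :=
  ("tau", [("tau", [[("products", ["pi", "nu"])], [("products", ["pi", "pi", "nu"])]])])

def Spec_find_final_states (particle : String)
    (decay_dict : List (String × List (List (String × List String))))
    (out : List (List String)) : Prop := out = find_final_states_alt particle decay_dict

instance (particle : String) (decay_dict : List (String × List (List (String × List String))))
    (out : List (List String)) : Decidable (Spec_find_final_states particle decay_dict out) := by
  unfold Spec_find_final_states; infer_instance

-- ===== CLAIM (what is proved, stated in full; the proofs are below) =====
def Claim_equal_find_final_states : Prop := ∀ (particle : String) (decay_dict : List (String × List (List (String × List String)))), Dom_find_final_states particle decay_dict → Pre_find_final_states particle decay_dict → Spec_find_final_states particle decay_dict (find_final_states particle decay_dict)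

-- ===== LEMMAS AND PROOFS =====

-- the canonical value of A at full fuel
def Fv (d : PySem.Dict String (List (List (String × List String)))) (p : String) :
    List (List String) :=
  ffsA d (d.size + 1) p

theorem okp_succ (d : PySem.Dict String (List (List (String × List String))))
    (i : Nat) (p : String) (h : okp d i p = true) : okp d (i + 1) p = true := by
  simp [okp, h]

theorem okp_mono (d : PySem.Dict String (List (List (String × List String))))
    {i j : Nat} (hij : i ≤ j) {p : String} (h : okp d i p = true) : okp d j p = true := by
  induction hij with
  | refl => exact h
  | step _ ih => exact okp_succ d _ p ih

theorem okp_zero_none (d : PySem.Dict String (List (List (String × List String))))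
    (p : String) (h : okp d 0 p = true) : d.get? p = none := by
  simpa [okp, Option.isNone_iff_eq_none] using h

theorem okp_children (d : PySem.Dict String (List (List (String × List String)))) :
    ∀ (i : Nat) (p : String) (decays : List (List (String × List String))),
    okp d (i + 1) p = true → d.get? p = some decays →
    ∀ decay ∈ decays, ∃ ps, (PySem.Dict.ofList decay).get? "products" = some ps ∧
      ∀ q ∈ ps, okp d i q = true := by
  intro i
  induction i with
  | zero =>
    intro p decays h hd decay hmem
    rw [show okp d 1 p = (okp d 0 p || match d.get? p with
          | none => true
          | some decays => decays.all (fun decay =>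
              match (PySem.Dict.ofList decay).get? "products" with
              | none => false
              | some ps => ps.all (okp d 0))) from rfl, hd] at h
    have h0 : okp d 0 p = false := by
      simp [okp, hd]
    rw [h0, Bool.false_or, List.all_eq_true] at h
    have := h decay hmem
    cases hps : (PySem.Dict.ofList decay).get? "products" with
    | none => rw [hps] at this; simp at this
    | some ps =>
      rw [hps] at this
      exact ⟨ps, rfl, by simpa [List.all_eq_true] using this⟩
  | succ i ih =>
    intro p decays h hd decay hmem
    rw [show okp d (i + 1 + 1) p = (okp d (i + 1) p || match d.get? p with
          | none => true
          | some decays => decays.all (fun decay =>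
              match (PySem.Dict.ofList decay).get? "products" with
              | none => false
              | some ps => ps.all (okp d (i + 1)))) from rfl, hd,
        Bool.or_eq_true] at h
    rcases h with h | h
    · obtain ⟨ps, hps, hok⟩ := ih p decays h hd decay hmem
      exact ⟨ps, hps, fun q hq => okp_mono d (Nat.le_succ i) (hok q hq)⟩
    · rw [List.all_eq_true] at h
      have := h decay hmem
      cases hps : (PySem.Dict.ofList decay).get? "products" with
      | none => rw [hps] at this; simp at this
      | some ps =>
        rw [hps] at this
        exact ⟨ps, rfl, by simpa [List.all_eq_true] using this⟩

theorem ffsA_succ (d : PySem.Dict String (List (List (String × List String))))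
    (n : Nat) (p : String) :
    ffsA d (n + 1) p =
      (match d.get? p with
       | none => [[p]]
       | some decays =>
         decays.foldl (fun fs decay =>
           let branches := ((PySem.Dict.ofList decay).getD "products" []).map (fun q => ffsA d n q)
           (prodA branches).foldl
             (fun fs c => stepA fs (PySem.List.sorted c.flatten (fun x => x) false)) fs) []) := rfl

theorem ffsA_stable (d : PySem.Dict String (List (List (String × List String)))) :
    ∀ (i : Nat) (p : String), okp d i p = true →
    ∀ n m : Nat, i < n → i < m → ffsA d n p = ffsA d m p := by
  intro i
  induction i with
  | zero =>
    intro p h n m hn hm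
    obtain ⟨n, rfl⟩ := Nat.exists_eq_add_of_lt hn
    obtain ⟨m, rfl⟩ := Nat.exists_eq_add_of_lt hm
    have hd := okp_zero_none d p h
    rw [ffsA_succ, ffsA_succ, hd]
  | succ i ih =>
    intro p h n m hn hm
    obtain ⟨n, rfl⟩ := Nat.exists_eq_add_of_lt hn
    obtain ⟨m, rfl⟩ := Nat.exists_eq_add_of_lt hm
    rw [ffsA_succ, ffsA_succ]
    cases hd : d.get? p with
    | none => rfl
    | some decays =>
      have hch := okp_children d i p decays h hd
      apply PySem.List.foldl_congr_mem
      intro fs decay hmem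
      obtain ⟨ps, hps, hok⟩ := hch decay hmem
      simp only [PySem.Dict.getD_of_get?_eq_some _ _ hps]
      have hb : ps.map (fun q => ffsA d (i + 1 + n) q) = ps.map (fun q => ffsA d (i + 1 + m) q) :=
        List.map_congr_left (fun q hq => ih q (hok q hq) _ _ (by omega) (by omega))
      rw [hb]

def MInv (d : PySem.Dict String (List (List (String × List String))))
    (m : PySem.Dict String (List (List String))) : Prop :=
  ∀ k v, m.get? k = some v → v = Fv d k

theorem goB_succ (d : PySem.Dict String (List (List (String × List String))))
    (n : Nat) (p : String) (m : PySem.Dict String (List (List String))) :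
    goB d (n + 1) p m =
      (match m.get? p with
       | some v => (v, m)
       | none =>
         match d.get? p with
         | none => ([[p]], m.insert p [[p]])
         | some decays =>
           let r := decays.foldl
             (fun (acc : List (List String) × PySem.Set (List String) ×
                         PySem.Dict String (List (List String))) decay =>
               let cm := ((PySem.Dict.ofList decay).getD "products" []).foldl
                 (fun (cm : List (List String) ×
                            PySem.Dict String (List (List String))) q =>
                   let gm := goB d n q cm.2
                   (cm.1.flatMap (fun c => gm.1.map (fun g => c ++ g)), gm.2))
                 ([[]], acc.2.2)
               let rs := cm.1.foldl
                 (fun (rs : List (List String) × PySem.Set (List String)) c =>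
                   let s := PySem.List.sorted c (fun x => x) false
                   if PySem.Set.contains rs.2 s then rs
                   else (rs.1 ++ [s], PySem.Set.add rs.2 s))
                 (acc.1, acc.2.1)
               (rs.1, rs.2, cm.2))
             ([], PySem.Set.empty, m)
           (r.1, r.2.2.insert p r.1)) := rfl

-- B's inner dedup loop (set of sorted states) equals A's "if not in: append" loop
theorem dedup_fold :
    ∀ (xs : List (List String)) (res : List (List String)) (seen : PySem.Set (List String)),
    (∀ x, x ∈ seen ↔ x ∈ res) →
    (List.foldl (fun (rs : List (List String) × PySem.Set (List String)) c =>
        let s := PySem.List.sorted c (fun x => x) false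
        if PySem.Set.contains rs.2 s then rs
        else (rs.1 ++ [s], PySem.Set.add rs.2 s)) (res, seen) xs).1
      = List.foldl (fun fs c => stepA fs (PySem.List.sorted c (fun x => x) false)) res xs ∧
    ∀ x, x ∈ (List.foldl (fun (rs : List (List String) × PySem.Set (List String)) c =>
        let s := PySem.List.sorted c (fun x => x) false
        if PySem.Set.contains rs.2 s then rs
        else (rs.1 ++ [s], PySem.Set.add rs.2 s)) (res, seen) xs).2 ↔
      x ∈ (List.foldl (fun (rs : List (List String) × PySem.Set (List String)) c =>
        let s := PySem.List.sorted c (fun x => x) false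
        if PySem.Set.contains rs.2 s then rs
        else (rs.1 ++ [s], PySem.Set.add rs.2 s)) (res, seen) xs).1 := by
  intro xs
  induction xs with
  | nil => intro res seen hinv; exact ⟨rfl, hinv⟩
  | cons c cs ih =>
    intro res seen hinv
    simp only [List.foldl_cons]
    by_cases hmem : PySem.List.sorted c (fun x => x) false ∈ seen
    · have hc : PySem.Set.contains seen (PySem.List.sorted c (fun x => x) false) = true := by
        rw [PySem.Set.contains_eq_decide]; exact decide_eq_true hmem
      have hst : stepA res (PySem.List.sorted c (fun x => x) false) = res := by
        rw [stepA, if_pos ((hinv _).mp hmem)]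
      simp only [hc, if_true, hst]
      exact ih res seen hinv
    · have hc : PySem.Set.contains seen (PySem.List.sorted c (fun x => x) false) = false := by
        rw [PySem.Set.contains_eq_decide]; exact decide_eq_false hmem
      have hst : stepA res (PySem.List.sorted c (fun x => x) false)
          = res ++ [PySem.List.sorted c (fun x => x) false] := by
        rw [stepA, if_neg (fun hx => hmem ((hinv _).mpr hx))]
      simp only [hc, Bool.false_eq_true, if_false, hst]
      exact ih _ _ (by
        intro x
        rw [PySem.Set.mem_add, List.mem_append, List.mem_singleton, hinv x])

-- B's products loop (threading the memo) builds exactly the flattened cartesian product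
-- of the children's final-state lists, and preserves the memo invariant
theorem comb_fold (d : PySem.Dict String (List (List (String × List String)))) (n' i' : Nat)
    (H : ∀ q (m : PySem.Dict String (List (List String))), okp d i' q = true → MInv d m →
         (goB d n' q m).1 = Fv d q ∧ MInv d (goB d n' q m).2) :
    ∀ (qs : List String), (∀ q ∈ qs, okp d i' q = true) →
    ∀ (cs : List (List String)) (m : PySem.Dict String (List (List String))), MInv d m →
    (List.foldl (fun (cm : List (List String) × PySem.Dict String (List (List String))) q =>
        let gm := goB d n' q cm.2
        (cm.1.flatMap (fun c => gm.1.map (fun g => c ++ g)), gm.2)) (cs, m) qs).1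
      = cs.flatMap (fun c0 => (prodA (qs.map (fun q => Fv d q))).map (fun comb => c0 ++ comb.flatten)) ∧
    MInv d (List.foldl (fun (cm : List (List String) × PySem.Dict String (List (List String))) q =>
        let gm := goB d n' q cm.2
        (cm.1.flatMap (fun c => gm.1.map (fun g => c ++ g)), gm.2)) (cs, m) qs).2 := by
  intro qs
  induction qs with
  | nil =>
    intro _ cs m hm
    refine ⟨?_, hm⟩
    simp [prodA]
  | cons q qs' ih =>
    intro hall cs m hm
    simp only [List.foldl_cons]
    obtain ⟨hv, hm1⟩ := H q m (hall q (List.mem_cons_self ..)) hm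
    rw [hv]
    obtain ⟨h1, h2⟩ := ih (fun r hr => hall r (List.mem_cons_of_mem q hr))
      (cs.flatMap (fun c => (Fv d q).map (fun g => c ++ g))) (goB d n' q m).2 hm1
    refine ⟨h1.trans ?_, h2⟩
    simp only [List.map_cons, prodA, List.flatMap_assoc, List.map_flatMap, List.flatMap_map,
      List.map_map, Function.comp_def, List.flatten_cons, List.append_assoc]

-- B's outer loop over the decays of one particle computes A's loop over the same decays
-- (with memoized child values), keeps seen = set(res), and preserves the memo invariant
theorem decays_fold (d : PySem.Dict String (List (List (String × List String)))) (n' i' : Nat)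
    (H : ∀ q (m : PySem.Dict String (List (List String))), okp d i' q = true → MInv d m →
         (goB d n' q m).1 = Fv d q ∧ MInv d (goB d n' q m).2) :
    ∀ (ds : List (List (String × List String))),
    (∀ decay ∈ ds, ∃ ps, (PySem.Dict.ofList decay).get? "products" = some ps ∧
        ∀ q ∈ ps, okp d i' q = true) →
    ∀ (res : List (List String)) (seen : PySem.Set (List String))
      (m : PySem.Dict String (List (List String))),
    (∀ x, x ∈ seen ↔ x ∈ res) → MInv d m →
    (List.foldl (fun (acc : List (List String) × PySem.Set (List String) ×
                         PySem.Dict String (List (List String))) decay =>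
               let cm := ((PySem.Dict.ofList decay).getD "products" []).foldl
                 (fun (cm : List (List String) ×
                            PySem.Dict String (List (List String))) q =>
                   let gm := goB d n' q cm.2
                   (cm.1.flatMap (fun c => gm.1.map (fun g => c ++ g)), gm.2))
                 ([[]], acc.2.2)
               let rs := cm.1.foldl
                 (fun (rs : List (List String) × PySem.Set (List String)) c =>
                   let s := PySem.List.sorted c (fun x => x) false
                   if PySem.Set.contains rs.2 s then rs
                   else (rs.1 ++ [s], PySem.Set.add rs.2 s))
                 (acc.1, acc.2.1)
               (rs.1, rs.2, cm.2)) (res, seen, m) ds).1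
      = List.foldl (fun fs decay =>
          (prodA (((PySem.Dict.ofList decay).getD "products" []).map (fun q => Fv d q))).foldl
            (fun fs c => stepA fs (PySem.List.sorted c.flatten (fun x => x) false)) fs) res ds ∧
    (∀ x, x ∈ (List.foldl (fun (acc : List (List String) × PySem.Set (List String) ×
                         PySem.Dict String (List (List String))) decay =>
               let cm := ((PySem.Dict.ofList decay).getD "products" []).foldl
                 (fun (cm : List (List String) ×
                            PySem.Dict String (List (List String))) q =>
                   let gm := goB d n' q cm.2
                   (cm.1.flatMap (fun c => gm.1.map (fun g => c ++ g)), gm.2))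
                 ([[]], acc.2.2)
               let rs := cm.1.foldl
                 (fun (rs : List (List String) × PySem.Set (List String)) c =>
                   let s := PySem.List.sorted c (fun x => x) false
                   if PySem.Set.contains rs.2 s then rs
                   else (rs.1 ++ [s], PySem.Set.add rs.2 s))
                 (acc.1, acc.2.1)
               (rs.1, rs.2, cm.2)) (res, seen, m) ds).2.1 ↔
       x ∈ (List.foldl (fun (acc : List (List String) × PySem.Set (List String) ×
                         PySem.Dict String (List (List String))) decay =>
               let cm := ((PySem.Dict.ofList decay).getD "products" []).foldl
                 (fun (cm : List (List String) ×
                            PySem.Dict String (List (List String))) q =>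
                   let gm := goB d n' q cm.2
                   (cm.1.flatMap (fun c => gm.1.map (fun g => c ++ g)), gm.2))
                 ([[]], acc.2.2)
               let rs := cm.1.foldl
                 (fun (rs : List (List String) × PySem.Set (List String)) c =>
                   let s := PySem.List.sorted c (fun x => x) false
                   if PySem.Set.contains rs.2 s then rs
                   else (rs.1 ++ [s], PySem.Set.add rs.2 s))
                 (acc.1, acc.2.1)
               (rs.1, rs.2, cm.2)) (res, seen, m) ds).1) ∧
    MInv d (List.foldl (fun (acc : List (List String) × PySem.Set (List String) ×
                         PySem.Dict String (List (List String))) decay =>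
               let cm := ((PySem.Dict.ofList decay).getD "products" []).foldl
                 (fun (cm : List (List String) ×
                            PySem.Dict String (List (List String))) q =>
                   let gm := goB d n' q cm.2
                   (cm.1.flatMap (fun c => gm.1.map (fun g => c ++ g)), gm.2))
                 ([[]], acc.2.2)
               let rs := cm.1.foldl
                 (fun (rs : List (List String) × PySem.Set (List String)) c =>
                   let s := PySem.List.sorted c (fun x => x) false
                   if PySem.Set.contains rs.2 s then rs
                   else (rs.1 ++ [s], PySem.Set.add rs.2 s))
                 (acc.1, acc.2.1)
               (rs.1, rs.2, cm.2)) (res, seen, m) ds).2.2 := by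
  intro ds
  induction ds with
  | nil => intro _ res seen m hseen hm; exact ⟨rfl, hseen, hm⟩
  | cons decay ds' ih =>
    intro hall res seen m hseen hm
    obtain ⟨ps, hps, hokq⟩ := hall decay (List.mem_cons_self ..)
    simp only [List.foldl_cons]
    obtain ⟨hc1, hc2⟩ := comb_fold d n' i' H ((PySem.Dict.ofList decay).getD "products" [])
      (by rw [PySem.Dict.getD_of_get?_eq_some _ _ hps]; exact hokq) [[]] m hm
    rw [hc1]
    have hflat : ([[]] : List (List String)).flatMap
        (fun c0 => (prodA (((PySem.Dict.ofList decay).getD "products" []).map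
            (fun q => Fv d q))).map (fun comb => c0 ++ comb.flatten))
        = (prodA (((PySem.Dict.ofList decay).getD "products" []).map
            (fun q => Fv d q))).map (fun comb => comb.flatten) := by
      simp
    rw [hflat]
    obtain ⟨hd1, hd2⟩ := dedup_fold ((prodA (((PySem.Dict.ofList decay).getD "products" []).map
      (fun q => Fv d q))).map (fun comb => comb.flatten)) res seen hseen
    have hres : List.foldl (fun fs c => stepA fs (PySem.List.sorted c (fun x => x) false)) res
        ((prodA (((PySem.Dict.ofList decay).getD "products" []).map
          (fun q => Fv d q))).map (fun comb => comb.flatten))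
        = List.foldl (fun fs c => stepA fs (PySem.List.sorted c.flatten (fun x => x) false)) res
          (prodA (((PySem.Dict.ofList decay).getD "products" []).map (fun q => Fv d q))) := by
      rw [List.foldl_map]
    rw [hres] at hd1
    rw [hd1] at hd2 ⊢
    exact ih (fun dc hdc => hall dc (List.mem_cons_of_mem decay hdc)) _ _ _ hd2 hc2

theorem goB_correct (d : PySem.Dict String (List (List (String × List String)))) :
    ∀ (n i : Nat) (p : String) (m : PySem.Dict String (List (List String))),
    okp d i p = true → i < n → i ≤ d.size → MInv d m →
    (goB d n p m).1 = Fv d p ∧ MInv d (goB d n p m).2 := by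
  intro n
  induction n with
  | zero => intro i p m _ hin _ _; omega
  | succ n' ihn =>
    intro i p m hok hin hisz hm
    rw [goB_succ]
    cases hmp : m.get? p with
    | some v => exact ⟨hm p v hmp, hm⟩
    | none =>
      cases hd : d.get? p with
      | none =>
        have hFv : Fv d p = [[p]] := by rw [Fv, ffsA_succ, hd]
        refine ⟨hFv.symm, ?_⟩
        intro k v hk
        rw [PySem.Dict.get?_insert] at hk
        by_cases hkp : k = p
        · rw [if_pos hkp] at hk; cases hk; rw [hkp, hFv]
        · rw [if_neg hkp] at hk; exact hm k v hk
      | some decays =>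
        cases i with
        | zero => exact absurd (okp_zero_none d p hok) (by simp [hd])
        | succ i' =>
          have hch := okp_children d i' p decays hok hd
          have H : ∀ q (m : PySem.Dict String (List (List String))),
              okp d i' q = true → MInv d m →
              (goB d n' q m).1 = Fv d q ∧ MInv d (goB d n' q m).2 :=
            fun q m hq hm => ihn i' q m hq (by omega) (by omega) hm
          have hFv : Fv d p = List.foldl (fun fs decay =>
              (prodA (((PySem.Dict.ofList decay).getD "products" []).map
                (fun q => Fv d q))).foldl
                (fun fs c => stepA fs (PySem.List.sorted c.flatten (fun x => x) false)) fs)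
              [] decays := by
            rw [Fv, ffsA_succ, hd]
            apply PySem.List.foldl_congr_mem
            intro fs decay hmem
            obtain ⟨ps, hps, hokq⟩ := hch decay hmem
            simp only [PySem.Dict.getD_of_get?_eq_some _ _ hps]
            have hmapc : ps.map (fun q => ffsA d d.size q) = ps.map (fun q => Fv d q) :=
              List.map_congr_left (fun q hq =>
                (ffsA_stable d i' q (hokq q hq) d.size (d.size + 1)
                  (by omega) (by omega)).trans rfl)
            rw [hmapc]
          obtain ⟨h1, h2, h3⟩ := decays_fold d n' i' H decays hch [] PySem.Set.empty m
            (by intro x; simp [PySem.Set.empty]) hm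
          refine ⟨?_, ?_⟩
          · exact h1.trans hFv.symm
          · intro k v hk
            rw [PySem.Dict.get?_insert] at hk
            by_cases hkp : k = p
            · rw [if_pos hkp] at hk; cases hk; rw [hkp]
              exact h1.trans hFv.symm
            · rw [if_neg hkp] at hk; exact h3 k v hk

-- ===== VERDICT (by name: the statement is the Claim_ definition above) =====
theorem find_final_states_spec : Claim_equal_find_final_states := by
  intro particle decay_dict _ hpre
  unfold Spec_find_final_states
  unfold find_final_states find_final_states_alt
  have := goB_correct (PySem.Dict.ofList decay_dict) ((PySem.Dict.ofList decay_dict).size + 1)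
    (PySem.Dict.ofList decay_dict).size particle PySem.Dict.empty hpre (by omega) (by omega)
    (by intro k v hk; simp [PySem.Dict.get?_empty] at hk)
  exact this.1.symm
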